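-- pv_equiv track=rewrite | github.com/KuangWenQing/pyProject | ubxTranslate/GPS_PFA.py | dict_to_broken
-- ===== SOURCE A (Python) =====
-- def dict_to_broken(d_: dict):
--     dddd = {}
--     for key in d_.keys():
--         flag, t = 0, 0
--         arr = []
--         for i in d_[key]:
--             if i == 1:
--                 if flag == 1:
--                     arr[-1][-1] += 1
--                 else:
--                     arr.append([t, 1])
--                 flag = 1
--             elif i == 0:
--                 flag = 0
--             else:
--                 raise Exception
--             t += 1
--         dddd[key] = arr
--     return dddd
-- ===== SOURCE B (Python) =====
-- def _ones_runs(seq):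
--     # scan run by run with two pointers instead of per-element flag state
--     runs = []
--     t = 0
--     rest = seq
--     while rest:
--         v = rest[0]
--         run = 1
--         while run < len(rest) and rest[run] == v:
--             run += 1
--         if v == 1:
--             runs.append([t, run])
--         elif v != 0:
--             raise Exception
--         t += run
--         rest = rest[run:]
--     return runs
--
--
-- def dict_to_broken(d_: dict):
--     return {key: _ones_runs(seq) for key, seq in d_.items()}
-- ===== Notes on version B (the rewrite author's own statement) =====
-- stated objective: alternative
-- what changed: B encodes each key's sequence by scanning it run by run with two pointers (advance to the end of the current run, emit [start,length] for a run of 1s) via a dict comprehension, instead of A's per-element loop that carries a flag and mutates the last pair in place.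
import Mathlib
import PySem

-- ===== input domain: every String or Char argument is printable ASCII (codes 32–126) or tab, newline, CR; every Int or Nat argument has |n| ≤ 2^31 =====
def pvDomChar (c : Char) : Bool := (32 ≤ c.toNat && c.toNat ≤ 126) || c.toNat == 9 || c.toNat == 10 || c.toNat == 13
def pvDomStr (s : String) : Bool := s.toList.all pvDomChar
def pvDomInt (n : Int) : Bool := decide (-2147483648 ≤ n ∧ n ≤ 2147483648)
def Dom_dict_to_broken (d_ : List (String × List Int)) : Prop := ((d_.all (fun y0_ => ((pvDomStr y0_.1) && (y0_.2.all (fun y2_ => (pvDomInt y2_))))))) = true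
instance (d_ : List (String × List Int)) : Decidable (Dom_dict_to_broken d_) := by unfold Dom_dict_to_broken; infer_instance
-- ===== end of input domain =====

-- B replaces A's per-element scan with a carried flag and an in-place bump of arr[-1][-1]
-- by a two-pointer scan over whole runs (alternative decomposition, same linear cost).

-- ===== PORT A =====
-- arr[-1][-1] += 1 : increment the last element of the last inner list
def incLast : List Int → List Int
  | [] => []
  | [x] => [x + 1]
  | x :: xs => x :: incLast xs

def incLastLast : List (List Int) → List (List Int)
  | [] => []
  | [r] => [incLast r]
  | r :: rs => r :: incLastLast rs

-- the inner `for i in d_[key]` loop carrying (flag, t, arr)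
def aInner : List Int → Int → Int → List (List Int) → List (List Int)
  | [], _, _, arr => arr
  | i :: rest, flag, t, arr =>
    if i = 1 then
      aInner rest 1 (t + 1) (if flag = 1 then incLastLast arr else arr ++ [[t, 1]])
    else if i = 0 then
      aInner rest 0 (t + 1) arr
    else
      arr  -- `raise Exception`: excluded by Pre_

-- dddd[key] = arr : under Pre_ the keys are distinct, so each dict insert appends
def dict_to_broken (d_ : List (String × List Int)) : List (String × List (List Int)) :=
  d_.foldl (fun dddd kv => dddd ++ [(kv.1, aInner kv.2 0 0 [])]) []

-- ===== PORT B =====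
-- the `while rest:` loop: run = 1 + #following elements equal to rest[0]; rest[run:] = tail.drop m
def bInner : List Int → Int → List (List Int) → List (List Int)
  | [], _, runs => runs
  | v :: tail, t, runs =>
    let m := (tail.takeWhile (fun x => x == v)).length
    if v = 1 then
      bInner (tail.drop m) (t + (1 + (m : Int))) (runs ++ [[t, 1 + (m : Int)]])
    else if v = 0 then
      bInner (tail.drop m) (t + (1 + (m : Int))) runs
    else
      runs  -- `raise Exception`: excluded by Pre_
  termination_by seq _ _ => seq.length
  decreasing_by
    all_goals simp only [List.length_drop, List.length_cons]; omega

-- the dict comprehension over d_.items()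
def dict_to_broken_alt (d_ : List (String × List Int)) : List (String × List (List Int)) :=
  d_.map (fun kv => (kv.1, bInner kv.2 0 []))

-- ===== PRECONDITION & SPEC =====
-- Pre_ excludes (a) lists containing a value other than 0/1, on which A raises Exception, and
-- (b) duplicate keys, which a Python dict argument cannot carry (the assoc list would not denote a dict).
def Pre_dict_to_broken (d_ : List (String × List Int)) : Prop :=
  (d_.map Prod.fst).Nodup ∧ ∀ p ∈ d_, ∀ i ∈ p.2, i = 0 ∨ i = 1

instance (d_ : List (String × List Int)) : Decidable (Pre_dict_to_broken d_) := by
  unfold Pre_dict_to_broken; infer_instance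

def pvWitness_dict_to_broken : (List (String × List Int)) :=
  [("a", [1, 1, 0, 1]), ("b", [0, 0]), ("c", [])]

def Spec_dict_to_broken (d_ : List (String × List Int)) (out : List (String × List (List Int))) : Prop := out = dict_to_broken_alt d_
instance (d_ : List (String × List Int)) (out : List (String × List (List Int))) : Decidable (Spec_dict_to_broken d_ out) := by unfold Spec_dict_to_broken; infer_instance

-- ===== CLAIM (what is proved, stated in full; the proofs are below) =====
def Claim_equal_dict_to_broken : Prop := ∀ (d_ : List (String × List Int)), Dom_dict_to_broken d_ → Pre_dict_to_broken d_ → Spec_dict_to_broken d_ (dict_to_broken d_)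

-- ===== LEMMAS AND PROOFS =====

lemma drop_len_takeWhile (p : Int → Bool) (l : List Int) :
    l.drop (l.takeWhile p).length = l.dropWhile p := by
  induction l with
  | nil => simp
  | cons a l ih => by_cases h : p a <;> simp [h, ih]

lemma incLastLast_append (arr : List (List Int)) (s c : Int) :
    incLastLast (arr ++ [[s, c]]) = arr ++ [[s, c + 1]] := by
  induction arr with
  | nil => simp [incLastLast, incLast]
  | cons a as ih =>
    cases as with
    | nil => simp [incLastLast, incLast]
    | cons b bs => simpa [incLastLast] using ih

-- skipping one zero at a time agrees with skipping the whole zero run at once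
lemma bInner_zero_cons (rest : List Int) (t : Int) (runs : List (List Int)) :
    bInner (0 :: rest) t runs = bInner rest (t + 1) runs := by
  cases rest with
  | nil => simp [bInner]
  | cons x r2 =>
    by_cases hx : x = 0
    · subst hx
      rw [bInner, bInner]
      simp only [List.takeWhile_cons]
      norm_num
      ring_nf
    · rw [bInner]
      simp only [List.takeWhile_cons, show ((x == (0:Int)) = false) by simp [hx]]
      norm_num [hx]

-- the core invariant: A's element loop equals B's run loop, for both values of the flag
lemma inner_main : ∀ (n : Nat) (seq : List Int), seq.length ≤ n → (∀ i ∈ seq, i = 0 ∨ i = 1) →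
    (∀ t arr, aInner seq 0 t arr = bInner seq t arr) ∧
    (∀ t arr s c, aInner seq 1 t (arr ++ [[s, c]]) =
      bInner (seq.dropWhile (fun x => x == 1))
        (t + ((seq.takeWhile (fun x => x == 1)).length : Int))
        (arr ++ [[s, c + ((seq.takeWhile (fun x => x == 1)).length : Int)]])) := by
  intro n
  induction n with
  | zero =>
    intro seq hlen _
    have : seq = [] := List.eq_nil_of_length_eq_zero (Nat.le_zero.mp hlen)
    subst this
    exact ⟨fun t arr => by simp [aInner, bInner], fun t arr s c => by simp [aInner, bInner]⟩
  | succ n ih =>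
    intro seq hlen hbits
    cases seq with
    | nil => exact ⟨fun t arr => by simp [aInner, bInner], fun t arr s c => by simp [aInner, bInner]⟩
    | cons v rest =>
      have hrest : rest.length ≤ n := by simpa using Nat.lt_succ_iff.mp (by simpa using hlen)
      have hbr : ∀ i ∈ rest, i = 0 ∨ i = 1 := fun i hi => hbits i (List.mem_cons_of_mem _ hi)
      obtain ⟨IH0, IH1⟩ := ih rest hrest hbr
      rcases hbits v List.mem_cons_self with hv | hv
      · -- v = 0
        subst hv
        constructor
        · intro t arr
          rw [bInner_zero_cons]
          simpa [aInner] using IH0 (t + 1) arr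
        · intro t arr s c
          have h1 : aInner (0 :: rest) 1 t (arr ++ [[s, c]])
              = aInner rest 0 (t + 1) (arr ++ [[s, c]]) := by simp [aInner]
          rw [h1, IH0]
          simp [bInner_zero_cons]
      · -- v = 1
        subst hv
        constructor
        · intro t arr
          have h1 : aInner (1 :: rest) 0 t arr
              = aInner rest 1 (t + 1) (arr ++ [[t, 1]]) := by simp [aInner]
          rw [h1, IH1]
          rw [bInner]
          norm_num
          rw [drop_len_takeWhile]
          ring_nf
        · intro t arr s c
          have h1 : aInner (1 :: rest) 1 t (arr ++ [[s, c]])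
              = aInner rest 1 (t + 1) (arr ++ [[s, c + 1]]) := by
            simp [aInner, incLastLast_append]
          rw [h1, IH1]
          norm_num
          ring_nf

lemma inner_eq (seq : List Int) (h : ∀ i ∈ seq, i = 0 ∨ i = 1) :
    aInner seq 0 0 [] = bInner seq 0 [] :=
  (inner_main seq.length seq le_rfl h).1 0 []

-- ===== VERDICT (by name: the statement is the Claim_ definition above) =====
theorem dict_to_broken_spec : Claim_equal_dict_to_broken := by
  intro d_ _ hpre
  unfold Spec_dict_to_broken dict_to_broken dict_to_broken_alt
  rw [PySem.List.foldl_append_singleton_eq_map]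
  exact List.map_congr_left fun kv hkv => by
    rw [inner_eq kv.2 (hpre.2 kv hkv)]
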